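-- pv_equiv track=rewrite | github.com/Disi77/Advent-of-Code | AdventOfCode2021/day18/puzzle.py | explode_pair
-- ===== SOURCE A (Python) =====
-- def explode_pair(number):
--     level = 0
--     for pointer, value in enumerate(number):
--         if value == "[":
--             level += 1
--             continue
--         elif value == "]":
--             level -= 1
--             continue
--         elif value == "," or level < 5:
--             continue
--
--         end = number.index("]", pointer + 1)
--         x, y = [int(x) for x in number[pointer:end].split(",")]
--         origin = f"[{x},{y}]"
--
--         #Searching number on the left
--         for i in range(pointer - 1, -1, -1):
--             diff = 0
--             if number[i].isdigit():
--                 from_index = i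
--                 origin_num = number[i]
--                 for s in range(i, -1, -1):
--                     if not number[s].isdigit():
--                         origin_num = number[s+1:i+1]
--                         from_index = s + 1
--                         break
--
--                 new_number = str(int(origin_num) + x)
--                 diff = len(new_number) - len(origin_num)
--                 pointer += diff
--                 number = number[:from_index] + new_number + number[i+1:]
--                 break
--
--         #Searching number on the right
--         for j in range(end + diff, len(number)):
--             if number[j].isdigit():
--                 origin_num = number[j]
--                 for e in range(j, len(number)):
--                     if not number[e].isdigit():
--                         origin_num = number[j:e]
--                         break
--                 new_number = str(int(origin_num) + y)
--                 number = number[:j] + new_number + number[j+len(origin_num):]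
--                 break
--         origin_index = number.index(origin, pointer - 1)
--         origin_end = origin_index + len(origin) - 1
--         number = number[:origin_index] + "0" + number[origin_end+1:]
--         break
--
--     return number
-- ===== SOURCE B (Python) =====
-- def tokenize(number):
--     toks = []
--     i = 0
--     n = len(number)
--     while i < n:
--         if number[i].isdigit():
--             j = i
--             while j < n and number[j].isdigit():
--                 j += 1
--             toks.append(number[i:j])
--             i = j
--         else:
--             toks.append(number[i])
--             i += 1
--     return toks
--
--
-- def bump_last(toks, x):
--     for l in range(len(toks) - 1, -1, -1):
--         if toks[l].isdigit():
--             return toks[:l] + [str(int(toks[l]) + x)] + toks[l + 1:]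
--     return toks
--
--
-- def bump_first(toks, y):
--     for r in range(len(toks)):
--         if toks[r].isdigit():
--             return toks[:r] + [str(int(toks[r]) + y)] + toks[r + 1:]
--     return toks
--
--
-- def explode_pair(number):
--     toks = tokenize(number)
--     depth = 0
--     for k in range(len(toks)):
--         t = toks[k]
--         if t == '[':
--             depth += 1
--             if depth >= 5 and k + 4 < len(toks) and toks[k + 1].isdigit() \
--                     and toks[k + 2] == ',' and toks[k + 3].isdigit() and toks[k + 4] == ']':
--                 left = bump_last(toks[:k], int(toks[k + 1]))
--                 right = bump_first(toks[k + 5:], int(toks[k + 3]))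
--                 return ''.join(left + ['0'] + right)
--         elif t == ']':
--             depth -= 1
--     return number
-- ===== Notes on version B (the rewrite author's own statement) =====
-- stated objective: alternative
-- what changed: B tokenizes the string once into bracket/comma/digit-run tokens and rebuilds the result in a single pass (bumping the nearest integer token on each side), instead of A's in-place string surgery with four index scans, pointer adjustment by a length diff, and a textual re-search of the exploded pair.
-- outside the precondition, e.g. on explode_pair('[[[[[07,9]]]]]'): A raises ValueError, B returns '[[[[0]]]]'; on explode_pair('[[[[[,1,0][1,0]]]]]]'): A returns '[[[[[,1,0]0]]]]]', B returns '[[[[[,1,1]0]]]]]'; on explode_pair('19[[[[[6,7]]]]]'): A returns '115[[[[0]]]]', B returns '25[[[[0]]]]'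
import Mathlib
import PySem

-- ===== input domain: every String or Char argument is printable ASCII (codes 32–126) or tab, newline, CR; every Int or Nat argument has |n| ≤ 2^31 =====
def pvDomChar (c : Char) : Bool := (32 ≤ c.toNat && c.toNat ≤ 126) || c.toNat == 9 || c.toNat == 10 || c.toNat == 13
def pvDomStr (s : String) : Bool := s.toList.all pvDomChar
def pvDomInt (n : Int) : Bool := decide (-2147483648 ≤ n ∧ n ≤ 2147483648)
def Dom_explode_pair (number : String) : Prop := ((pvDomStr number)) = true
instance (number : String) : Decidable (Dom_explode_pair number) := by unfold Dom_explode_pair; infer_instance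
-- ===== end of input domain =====

-- B re-implements the explode step on a token list (brackets/commas/grouped digit runs) rebuilt in one
-- pass, instead of A's in-place string surgery with four index scans and a textual re-search of the pair;
-- equality is proved on Pre_, which keeps to well-formed inputs (see the comment at Pre_).


-- ===== PORT A =====
-- A's inner "search number on the left": the backward scan for the start of the digit run
-- (for s in range(i, -1, -1): ... ); loop exhaustion keeps the stale initial state (number[i], i).
def aLeftRun (n : List Char) (i : Int) : List Int → (List Char × Int)
  | [] => ([PySem.List.pyGetD n i ' '], i)
  | s :: rest =>
    if ¬ PySem.Chars.isdigit (PySem.List.pyGetD n s ' ') then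
      (PySem.List.slice n (some (s + 1)) (some (i + 1)), s + 1)
    else aLeftRun n i rest

-- A's "searching number on the left" loop over range(pointer-1, -1, -1); returns (number, pointer, diff).
-- int(origin_num) is ported as (ofChars? …).getD 0: origin_num is a digit run, so ValueError is unreachable.
def aLeft (n : List Char) (ptr x : Int) : List Int → (List Char × Int × Int)
  | [] => (n, ptr, 0)
  | i :: rest =>
    if PySem.Chars.isdigit (PySem.List.pyGetD n i ' ') then
      let res := aLeftRun n i (PySem.List.pyRange i (-1) (-1))
      let newN := PySem.Int.toChars ((PySem.Int.ofChars? res.1).getD 0 + x)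
      let diff := (newN.length : Int) - (res.1.length : Int)
      (PySem.List.slice n none (some res.2) ++ newN ++ PySem.List.slice n (some (i + 1)) none,
       ptr + diff, diff)
    else aLeft n ptr x rest

-- A's inner forward scan for the end of the digit run on the right (loop exhaustion keeps number[j]).
def aRightRun (n : List Char) (j : Int) : List Int → List Char
  | [] => [PySem.List.pyGetD n j ' ']
  | e :: rest =>
    if ¬ PySem.Chars.isdigit (PySem.List.pyGetD n e ' ') then
      PySem.List.slice n (some j) (some e)
    else aRightRun n j rest

-- A's "searching number on the right" loop over range(end+diff, len(number)).
def aRight (n : List Char) (y : Int) : List Int → List Char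
  | [] => n
  | j :: rest =>
    if PySem.Chars.isdigit (PySem.List.pyGetD n j ' ') then
      let orig := aRightRun n j (PySem.List.pyRange j (n.length : Int) 1)
      let newN := PySem.Int.toChars ((PySem.Int.ofChars? orig).getD 0 + y)
      PySem.List.slice n none (some j) ++ newN ++
        PySem.List.slice n (some (j + (orig.length : Int))) none
    else aRight n y rest

-- The body of A's main loop once a character at level >= 5 is hit (pointer = its index).
-- Where Python raises (str.index ValueError, int() ValueError, unpacking of a split with != 2 pieces)
-- the port returns the current string; all of these are unreachable on inputs satisfying Pre_.
def aBody (n : List Char) (ptr : Int) : List Char :=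
  let endI := PySem.Chars.findFrom n [']'] (ptr + 1)
  if endI = -1 then n
  else
    match PySem.Chars.splitOn (PySem.List.slice n (some ptr) (some endI)) [','] with
    | [xs, ys] =>
      let x := (PySem.Int.ofChars? xs).getD 0
      let y := (PySem.Int.ofChars? ys).getD 0
      let origin := '[' :: (PySem.Int.toChars x ++ ',' :: (PySem.Int.toChars y ++ [']']))
      let res := aLeft n ptr x (PySem.List.pyRange (ptr - 1) (-1) (-1))
      let n2 := aRight res.1 y (PySem.List.pyRange (endI + res.2.2) (res.1.length : Int) 1)
      let oi := PySem.Chars.findFrom n2 origin (res.2.1 - 1)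
      if oi = -1 then n2
      else
        PySem.List.slice n2 none (some oi) ++
          '0' :: PySem.List.slice n2 (some (oi + (origin.length : Int))) none
    | _ => n

-- A's main loop: for pointer, value in enumerate(number), tracking level, break via aBody.
def aScan (n : List Char) : List (Int × Char) → Int → List Char
  | [], _ => n
  | (ptr, v) :: rest, lvl =>
    if v = '[' then aScan n rest (lvl + 1)
    else if v = ']' then aScan n rest (lvl - 1)
    else if v = ',' ∨ lvl < 5 then aScan n rest lvl
    else aBody n ptr

def explode_pair (number : String) : String :=
  String.ofList (aScan number.toList (PySem.List.enumerate number.toList 0) 0)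

-- ===== PORT B =====
-- tokenize: brackets/commas/other single characters, maximal digit runs grouped into one token.
-- run: the digit run currently being grouped, reversed (none = not inside a run)
def tokAux : Option (List Char) → List Char → List (List Char)
  | none, [] => []
  | some run, [] => [run.reverse]
  | none, c :: r =>
    if PySem.Chars.isdigit c then tokAux (some [c]) r else [c] :: tokAux none r
  | some run, c :: r =>
    if PySem.Chars.isdigit c then tokAux (some (c :: run)) r
    else run.reverse :: [c] :: tokAux none r

def tokenizeB (cs : List Char) : List (List Char) := tokAux none cs

-- bump_first: add y to the first integer token (int() on a digit token never raises; getD 0).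
def bumpFirstB (toks : List (List Char)) (y : Int) : List (List Char) :=
  match toks with
  | [] => []
  | t :: rest =>
    if PySem.Chars.strIsdigit t then
      PySem.Int.toChars ((PySem.Int.ofChars? t).getD 0 + y) :: rest
    else t :: bumpFirstB rest y

-- bump_last: the downward index scan of Source B = bump the first integer token of the reversed list.
def bumpLastB (toks : List (List Char)) (x : Int) : List (List Char) :=
  (bumpFirstB toks.reverse x).reverse

-- Source B's main loop over the token list, tracking depth; done holds the already-visited tokens reversed.
def bScan (orig : List Char) : List (List Char) → Int → List (List Char) → List Char
  | _, _, [] => orig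
  | done, depth, t :: rest =>
    if t = ['['] then
      if 5 ≤ depth + 1 then
        match rest with
        | t1 :: t2 :: t3 :: t4 :: rest' =>
          if PySem.Chars.strIsdigit t1 ∧ t2 = [','] ∧ PySem.Chars.strIsdigit t3 ∧ t4 = [']'] then
            PySem.Chars.join []
              (bumpLastB done.reverse ((PySem.Int.ofChars? t1).getD 0) ++
                ['0'] :: bumpFirstB rest' ((PySem.Int.ofChars? t3).getD 0))
          else bScan orig (t :: done) (depth + 1) rest
        | _ => bScan orig (t :: done) (depth + 1) rest
      else bScan orig (t :: done) (depth + 1) rest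
    else if t = [']'] then bScan orig (t :: done) (depth - 1) rest
    else bScan orig (t :: done) depth rest

def explode_pair_alt (number : String) : String :=
  String.ofList (bScan number.toList [] 0 (tokenizeB number.toList))

-- ===== PRECONDITION & SPEC =====
-- Scanner for the precondition: first character at nesting level >= 5 other than '[' ']' ','.
-- clean: no such character; found P r: it is a digit right after a '[', the string is P ++ '[' ++ r;
-- bad: any other shape (A raises there, or its textual re-search rewrites an accidental occurrence).
inductive LocRes where
  | clean : LocRes
  | bad : LocRes
  | found : List Char → List Char → LocRes
deriving DecidableEq

def pushP (c : Char) : LocRes → LocRes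
  | .found P r => .found (c :: P) r
  | x => x

def headDigit : List Char → Bool
  | c :: _ => PySem.Chars.isdigit c
  | [] => false

def locate (d : Int) : List Char → LocRes
  | [] => .clean
  | c :: r =>
    if c = '[' then
      if 5 ≤ d + 1 ∧ headDigit r = true then
        .found [] r
      else pushP '[' (locate (d + 1) r)
    else if c = ']' then pushP ']' (locate (d - 1) r)
    else if c = ',' then pushP ',' (locate d r)
    else if d < 5 then pushP c (locate d r) else .bad

-- canonical decimal literal: str(int(z)) == z
def canonB (z : List Char) : Bool :=
  PySem.Int.toChars ((PySem.Int.ofChars? z).getD 0) == z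

-- after the trigger: digits ',' digits ']' with both numbers canonical
def patChk (r : List Char) : Bool :=
  let X := r.takeWhile PySem.Chars.isdigit
  match r.dropWhile PySem.Chars.isdigit with
  | ',' :: r2 =>
    let Y := r2.takeWhile PySem.Chars.isdigit
    match r2.dropWhile PySem.Chars.isdigit with
    | ']' :: _ => !X.isEmpty && !Y.isEmpty && canonB X && canonB Y
    | _ => false
  | _ => false

-- the part of the string after the exploding pair "[X,Y]"
def sOf (r : List Char) : List Char :=
  match r.dropWhile PySem.Chars.isdigit with
  | ',' :: r2 => (match r2.dropWhile PySem.Chars.isdigit with | ']' :: S => S | _ => [])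
  | _ => []

-- left neighbour digit run of the pair reaches the very start of the string and has >= 2 digits
def edgeLB (P : List Char) : Bool :=
  decide (2 ≤ (P.takeWhile PySem.Chars.isdigit).length) &&
    (P.dropWhile PySem.Chars.isdigit).all (fun c => !PySem.Chars.isdigit c)

-- right neighbour digit run of the pair reaches the very end of the string and has >= 2 digits
def edgeRB (S : List Char) : Bool :=
  let t := S.dropWhile (fun c => !PySem.Chars.isdigit c)
  decide (2 ≤ t.length) && t.all PySem.Chars.isdigit

-- Pre_ admits every string without an explode trigger, and triggered strings in which the trigger is a
-- canonically written regular pair of two decimal numbers entered right at its '[' whose neighbouring digit runs do not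
-- touch the string boundary. It excludes (only among triggered strings, all malformed as snailfish
-- numbers, which begin with '[' and end with ']'): shapes on which A raises ValueError; shapes on which
-- A's textual re-search of the pair text can rewrite an accidental other occurrence of that text; and strings
-- whose digit run adjacent to the pair reaches the string's first or last character with >= 2 digits,
-- where A's exhausted inner scan adds the pair's value to the single boundary digit only (see cites).
def Pre_explode_pair (number : String) : Prop :=
  (match locate 0 number.toList with
   | .clean => true
   | .bad => false
   | .found P r => patChk r && !(edgeLB P || edgeRB (sOf r))) = true

instance (number : String) : Decidable (Pre_explode_pair number) := by
  unfold Pre_explode_pair; infer_instance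

def pvWitness_explode_pair : String := "[[[[[9,8],1],2],3],4]"

def Spec_explode_pair (number : String) (out : String) : Prop :=
  out = explode_pair_alt number

instance (number : String) (out : String) : Decidable (Spec_explode_pair number out) := by
  unfold Spec_explode_pair; infer_instance

-- ===== CLAIM (what is proved, stated in full; the proofs are below) =====
def Claim_equal_explode_pair : Prop :=
  ∀ (number : String), Dom_explode_pair number → Pre_explode_pair number →
    Spec_explode_pair number (explode_pair number)

-- ===== LEMMAS AND PROOFS =====

-- abbreviations used by the proofs only
def isD (c : Char) : Bool := PySem.Chars.isdigit c

-- net bracket depth of a character list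
def netB : List Char → Int
  | [] => 0
  | c :: r => (if c = '[' then 1 else if c = ']' then -1 else 0) + netB r

-- trigger-freeness of a prefix scanned from depth d
def tfB (d : Int) : List Char → Bool
  | [] => true
  | c :: r =>
    if c = '[' then tfB (d + 1) r
    else if c = ']' then tfB (d - 1) r
    else if c = ',' then tfB d r
    else decide (d < 5) && tfB d r

theorem locate_cons_lb (d : Int) (r : List Char) :
    locate d ('[' :: r) =
      if 5 ≤ d + 1 ∧ headDigit r = true then .found [] r
      else pushP '[' (locate (d + 1) r) := by
  simp [locate]

theorem locate_cons_rb (d : Int) (r : List Char) :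
    locate d (']' :: r) = pushP ']' (locate (d - 1) r) := by
  simp [locate]

theorem locate_cons_comma (d : Int) (r : List Char) :
    locate d (',' :: r) = pushP ',' (locate d r) := by
  simp [locate]

theorem locate_cons_other {c : Char} (d : Int) (r : List Char)
    (hb : c ≠ '[') (hb2 : c ≠ ']') (hb3 : c ≠ ',') :
    locate d (c :: r) = if d < 5 then pushP c (locate d r) else .bad := by
  simp [locate, hb, hb2, hb3]

theorem tfB_lb (d : Int) (r : List Char) : tfB d ('[' :: r) = tfB (d + 1) r := by simp [tfB]

theorem tfB_rb (d : Int) (r : List Char) : tfB d (']' :: r) = tfB (d - 1) r := by simp [tfB]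

theorem tfB_comma (d : Int) (r : List Char) : tfB d (',' :: r) = tfB d r := by simp [tfB]

theorem tfB_other {c : Char} (d : Int) (r : List Char)
    (hb : c ≠ '[') (hb2 : c ≠ ']') (hb3 : c ≠ ',') :
    tfB d (c :: r) = (decide (d < 5) && tfB d r) := by
  simp [tfB, hb, hb2, hb3]

theorem netB_cons (c : Char) (r : List Char) :
    netB (c :: r) = (if c = '[' then 1 else if c = ']' then -1 else 0) + netB r := rfl

theorem locate_clean_tf {cs : List Char} : ∀ {d : Int}, locate d cs = .clean →
    tfB d cs = true := by
  induction cs with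
  | nil => intro d _; rfl
  | cons c r ih =>
    intro d h
    by_cases hb : c = '['
    · subst hb
      rw [locate_cons_lb] at h
      split at h
      · exact absurd h (by simp)
      · rw [tfB_lb]
        cases hr : locate (d + 1) r <;> rw [hr] at h <;> simp [pushP] at h <;> exact ih hr
    · by_cases hb2 : c = ']'
      · subst hb2
        rw [locate_cons_rb] at h
        rw [tfB_rb]
        cases hr : locate (d - 1) r <;> rw [hr] at h <;> simp [pushP] at h <;> exact ih hr
      · by_cases hb3 : c = ','
        · subst hb3
          rw [locate_cons_comma] at h
          rw [tfB_comma]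
          cases hr : locate d r <;> rw [hr] at h <;> simp [pushP] at h <;> exact ih hr
        · rw [locate_cons_other d r hb hb2 hb3] at h
          rw [tfB_other d r hb hb2 hb3]
          split at h
          · rename_i hd
            cases hr : locate d r <;> rw [hr] at h <;> simp [pushP] at h <;>
              simp [hd, ih hr]
          · exact absurd h (by simp)

theorem locate_found {cs : List Char} : ∀ {d : Int} {P r : List Char},
    locate d cs = .found P r →
    cs = P ++ '[' :: r ∧ tfB d P = true ∧ 5 ≤ d + netB P + 1 ∧
      (∃ c' r', r = c' :: r' ∧ isD c' = true) := by
  induction cs with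
  | nil => intro d P r h; exact absurd h (by simp [locate])
  | cons c cs' ih =>
    intro d P r h
    by_cases hb : c = '['
    · subst hb
      rw [locate_cons_lb] at h
      split at h
      · rename_i hfire
        obtain ⟨hd5, hdg⟩ := hfire
        cases h
        refine ⟨rfl, rfl, by simp [netB]; omega, ?_⟩
        cases cs' with
        | nil => simp [headDigit] at hdg
        | cons c' r' => exact ⟨c', r', rfl, by simpa [headDigit, isD] using hdg⟩
      · cases hr : locate (d + 1) cs' with
        | clean => rw [hr] at h; simp [pushP] at h
        | bad => rw [hr] at h; simp [pushP] at h
        | found P0 r0 =>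
          rw [hr] at h; simp [pushP] at h
          obtain ⟨hP, hrr⟩ := h
          obtain ⟨h1, h2, h3, h4⟩ := ih hr
          subst hP hrr
          refine ⟨by simp [h1], by rw [tfB_lb]; exact h2, by rw [netB_cons]; simp; omega, h4⟩
    · by_cases hb2 : c = ']'
      · subst hb2
        rw [locate_cons_rb] at h
        cases hr : locate (d - 1) cs' with
        | clean => rw [hr] at h; simp [pushP] at h
        | bad => rw [hr] at h; simp [pushP] at h
        | found P0 r0 =>
          rw [hr] at h; simp [pushP] at h
          obtain ⟨hP, hrr⟩ := h
          obtain ⟨h1, h2, h3, h4⟩ := ih hr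
          subst hP hrr
          refine ⟨by simp [h1], by rw [tfB_rb]; exact h2, by rw [netB_cons]; simp; omega, h4⟩
      · by_cases hb3 : c = ','
        · subst hb3
          rw [locate_cons_comma] at h
          cases hr : locate d cs' with
          | clean => rw [hr] at h; simp [pushP] at h
          | bad => rw [hr] at h; simp [pushP] at h
          | found P0 r0 =>
            rw [hr] at h; simp [pushP] at h
            obtain ⟨hP, hrr⟩ := h
            obtain ⟨h1, h2, h3, h4⟩ := ih hr
            subst hP hrr
            refine ⟨by simp [h1], by rw [tfB_comma]; exact h2,
              by rw [netB_cons]; simp [hb, hb2]; omega, h4⟩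
        · rw [locate_cons_other d cs' hb hb2 hb3] at h
          split at h
          · rename_i hd
            cases hr : locate d cs' with
            | clean => rw [hr] at h; simp [pushP] at h
            | bad => rw [hr] at h; simp [pushP] at h
            | found P0 r0 =>
              rw [hr] at h; simp [pushP] at h
              obtain ⟨hP, hrr⟩ := h
              obtain ⟨h1, h2, h3, h4⟩ := ih hr
              subst hP hrr
              refine ⟨by simp [h1], by rw [tfB_other d P0 hb hb2 hb3]; simp [hd, h2],
                by rw [netB_cons]; simp [hb, hb2]; omega, h4⟩
          · exact absurd h (by simp)

-- ---------- generic list helpers ----------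

theorem takeWhile_all_append {p : Char → Bool} {xs ys : List Char} (hx : xs.all p = true)
    (hy : ys.takeWhile p = []) : (xs ++ ys).takeWhile p = xs ∧ (xs ++ ys).dropWhile p = ys := by
  induction xs with
  | nil =>
    refine ⟨by simpa using hy, ?_⟩
    cases ys with
    | nil => rfl
    | cons c cs =>
      have hc : p c = false := by
        by_contra hcc
        simp only [List.takeWhile_cons] at hy
        rw [if_pos (by simpa using hcc)] at hy
        exact absurd hy (by simp)
      simp [List.dropWhile_cons, hc]
  | cons c r ih =>
    simp only [List.all_cons, Bool.and_eq_true] at hx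
    have := ih hx.2
    simp [List.takeWhile_cons, List.dropWhile_cons, hx.1, this.1, this.2]

theorem takeWhile_nil_of_head {p : Char → Bool} {ys : List Char}
    (h : ∀ c cs, ys = c :: cs → p c = false) : ys.takeWhile p = [] := by
  cases ys with
  | nil => rfl
  | cons c cs => simp [List.takeWhile_cons, h c cs rfl]

theorem digit_ne_special {c : Char} (h : PySem.Chars.isdigit c = true) :
    c ≠ '[' ∧ c ≠ ']' ∧ c ≠ ',' := by
  simp only [PySem.Chars.isdigit, Bool.and_eq_true, decide_eq_true_eq] at h
  refine ⟨?_, ?_, ?_⟩ <;> rintro rfl <;> revert h <;> decide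

-- ---------- tokenizer lemmas ----------

theorem tokAux_run (cs : List Char) : ∀ run,
    tokAux (some run) cs =
      (run.reverse ++ cs.takeWhile PySem.Chars.isdigit) ::
        tokAux none (cs.dropWhile PySem.Chars.isdigit) := by
  induction cs with
  | nil => intro run; simp [tokAux]
  | cons c r ih =>
    intro run
    by_cases hc : PySem.Chars.isdigit c
    · simp [tokAux, hc, List.takeWhile_cons, List.dropWhile_cons, ih]
    · simp [tokAux, hc, List.takeWhile_cons, List.dropWhile_cons]

theorem tok_nil : tokenizeB [] = [] := rfl

theorem tok_cons_digit {c : Char} (r : List Char) (hc : PySem.Chars.isdigit c = true) :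
    tokenizeB (c :: r) =
      (c :: r.takeWhile PySem.Chars.isdigit) :: tokenizeB (r.dropWhile PySem.Chars.isdigit) := by
  simp [tokenizeB, tokAux, hc, tokAux_run]

theorem tok_cons_nondigit {c : Char} (r : List Char) (hc : PySem.Chars.isdigit c = false) :
    tokenizeB (c :: r) = [c] :: tokenizeB r := by
  simp [tokenizeB, tokAux, hc]

theorem tok_run_append {X rest : List Char} (hne : X ≠ []) (hall : X.all PySem.Chars.isdigit = true)
    (hrest : rest.takeWhile PySem.Chars.isdigit = []) :
    tokenizeB (X ++ rest) = X :: tokenizeB rest := by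
  cases X with
  | nil => exact absurd rfl hne
  | cons c xr =>
    simp only [List.all_cons, Bool.and_eq_true] at hall
    obtain ⟨h1, h2⟩ := takeWhile_all_append (p := PySem.Chars.isdigit) hall.2 hrest
    rw [List.cons_append, tok_cons_digit _ hall.1, h1, h2]

theorem tok_append {bs : List Char} (hbs : bs.takeWhile PySem.Chars.isdigit = []) :
    ∀ (n : Nat) (as : List Char), as.length ≤ n →
    tokenizeB (as ++ bs) = tokenizeB as ++ tokenizeB bs := by
  intro n
  induction n with
  | zero =>
    intro as h
    cases as with
    | nil => rw [tok_nil]; simp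
    | cons c r => simp at h
  | succ m ih =>
    intro as hlen
    cases as with
    | nil => rw [tok_nil]; simp
    | cons c r =>
      by_cases hc : PySem.Chars.isdigit c
      · have hsplit := List.takeWhile_append_dropWhile (p := PySem.Chars.isdigit) (l := r)
        have hside : (r.dropWhile PySem.Chars.isdigit ++ bs).takeWhile PySem.Chars.isdigit = [] := by
          cases hdr : r.dropWhile PySem.Chars.isdigit with
          | nil => simpa [hdr] using hbs
          | cons d ds =>
            have hd : PySem.Chars.isdigit d = false := by
              have := List.head_dropWhile_not (p := PySem.Chars.isdigit) (l := r)
              simp [hdr] at this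
              simpa using this
            simp [List.takeWhile_cons, hd]
        obtain ⟨h1, h2⟩ := takeWhile_all_append (p := PySem.Chars.isdigit)
          (xs := r.takeWhile PySem.Chars.isdigit) (ys := r.dropWhile PySem.Chars.isdigit ++ bs)
          (by simpa using List.all_takeWhile ..) hside
        rw [List.cons_append, tok_cons_digit _ hc, tok_cons_digit _ hc]
        rw [show r ++ bs = r.takeWhile PySem.Chars.isdigit ++ (r.dropWhile PySem.Chars.isdigit ++ bs) by
          rw [← List.append_assoc, hsplit]]
        rw [h1, h2]
        have hlt : (r.dropWhile PySem.Chars.isdigit).length ≤ m := by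
          have := List.length_dropWhile_le PySem.Chars.isdigit r
          simp at hlen; omega
        rw [ih _ hlt, List.cons_append]
      · rw [List.cons_append, tok_cons_nondigit _ (by simpa using hc),
          tok_cons_nondigit _ (by simpa using hc), ih r (by simp at hlen; omega), List.cons_append]

theorem tok_digitfree {M : List Char} (h : M.all (fun c => !PySem.Chars.isdigit c) = true) :
    tokenizeB M = M.map (fun c => [c]) := by
  induction M with
  | nil => rfl
  | cons c r ih =>
    simp only [List.all_cons, Bool.and_eq_true] at h
    rw [tok_cons_nondigit _ (by simpa using h.1), ih h.2, List.map_cons]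

theorem join_nil_flatten (ps : List (List Char)) : PySem.Chars.join [] ps = ps.flatten := by
  induction ps with
  | nil => simp [PySem.Chars.join, List.intercalate]
  | cons a t ih =>
    cases t with
    | nil => simp [PySem.Chars.join, List.intercalate]
    | cons b t' =>
      simp only [PySem.Chars.join, List.intercalate, List.intersperse] at *
      simp only [List.flatten_cons] at *
      rw [ih]
      simp

theorem flatten_tok : ∀ (n : Nat) (cs : List Char), cs.length ≤ n →
    (tokenizeB cs).flatten = cs := by
  intro n
  induction n with
  | zero =>
    intro cs h
    cases cs with
    | nil => rfl
    | cons c r => simp at h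
  | succ m ih =>
    intro cs hlen
    cases cs with
    | nil => rfl
    | cons c r =>
      by_cases hc : PySem.Chars.isdigit c
      · rw [tok_cons_digit _ hc, List.flatten_cons]
        have hlt : (r.dropWhile PySem.Chars.isdigit).length ≤ m := by
          have := List.length_dropWhile_le PySem.Chars.isdigit r
          simp at hlen; omega
        rw [ih _ hlt]
        simp [List.takeWhile_append_dropWhile]
      · rw [tok_cons_nondigit _ (by simpa using hc), List.flatten_cons, ih r (by simp at hlen; omega)]
        simp

-- ---------- A scan ----------

theorem aScan_cons (n : List Char) (p : Int) (v : Char) (rest : List (Int × Char)) (lvl : Int) :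
    aScan n ((p, v) :: rest) lvl =
      if v = '[' then aScan n rest (lvl + 1)
      else if v = ']' then aScan n rest (lvl - 1)
      else if v = ',' ∨ lvl < 5 then aScan n rest lvl
      else aBody n p := rfl

theorem aScan_skip {cs : List Char} : ∀ {lvl s : Int} (n : List Char) (t : List (Int × Char)),
    tfB lvl cs = true →
    aScan n (PySem.List.enumerate cs s ++ t) lvl = aScan n t (lvl + netB cs) := by
  induction cs with
  | nil => intro lvl s n t _; simp [PySem.List.enumerate_nil, netB]
  | cons c r ih =>
    intro lvl s n t htf
    rw [PySem.List.enumerate_cons, List.cons_append, aScan_cons]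
    by_cases hb : c = '['
    · subst hb
      rw [tfB_lb] at htf
      rw [if_pos rfl, ih n t htf]
      congr 1
      rw [netB_cons]
      simp
      ring
    · by_cases hb2 : c = ']'
      · subst hb2
        rw [tfB_rb] at htf
        rw [if_neg (by decide), if_pos rfl, ih n t htf]
        congr 1
        rw [netB_cons]
        simp
        ring
      · by_cases hb3 : c = ','
        · subst hb3
          rw [tfB_comma] at htf
          rw [if_neg (by decide), if_neg (by decide), if_pos (Or.inl rfl), ih n t htf]
          congr 1
          rw [netB_cons]
          simp
        · rw [tfB_other _ _ hb hb2 hb3, Bool.and_eq_true, decide_eq_true_eq] at htf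
          rw [if_neg hb, if_neg hb2, if_pos (Or.inr htf.1), ih n t htf.2]
          congr 1
          rw [netB_cons]
          simp [hb, hb2]

-- ---------- B scan ----------

theorem bScan_cons_other (orig : List Char) (done : List (List Char)) (depth : Int)
    {t : List Char} (rest : List (List Char))
    (h1 : t ≠ ['[']) (h2 : t ≠ [']']) :
    bScan orig done depth (t :: rest) = bScan orig (t :: done) depth rest := by
  simp [bScan, h1, h2]

theorem bScan_cons_rb (orig : List Char) (done : List (List Char)) (depth : Int)
    (rest : List (List Char)) :
    bScan orig done depth ([']'] :: rest) = bScan orig ([']'] :: done) (depth - 1) rest := by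
  simp [bScan]

theorem bScan_cons_lb_low (orig : List Char) (done : List (List Char)) {depth : Int}
    (rest : List (List Char)) (hd : ¬ 5 ≤ depth + 1) :
    bScan orig done depth (['['] :: rest) = bScan orig (['['] :: done) (depth + 1) rest := by
  cases rest with
  | nil => simp [bScan, hd]
  | cons t1 ts =>
    cases ts with
    | nil => simp [bScan, hd]
    | cons t2 ts2 =>
      cases ts2 with
      | nil => simp [bScan, hd]
      | cons t3 ts3 =>
        cases ts3 with
        | nil => simp [bScan, hd]
        | cons t4 ts4 => simp [bScan, hd]

theorem bScan_cons_lb_nofire (orig : List Char) (done : List (List Char)) (depth : Int)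
    {rest : List (List Char)}
    (h : rest = [] ∨ ∃ t1 ts, rest = t1 :: ts ∧ PySem.Chars.strIsdigit t1 = false) :
    bScan orig done depth (['['] :: rest) = bScan orig (['['] :: done) (depth + 1) rest := by
  by_cases hd : 5 ≤ depth + 1
  · rcases h with rfl | ⟨t1, ts, rfl, hfalse⟩
    · simp [bScan, hd]
    · cases ts with
      | nil => simp [bScan, hd]
      | cons t2 ts2 =>
        cases ts2 with
        | nil => simp [bScan, hd]
        | cons t3 ts3 =>
          cases ts3 with
          | nil => simp [bScan, hd]
          | cons t4 ts4 => simp [bScan, hd, hfalse]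
  · exact bScan_cons_lb_low orig done rest hd

theorem tfB_digit_append {xs : List Char} (hall : xs.all PySem.Chars.isdigit = true) :
    ∀ {d : Int} {ys : List Char}, tfB d (xs ++ ys) = true → tfB d ys = true := by
  induction xs with
  | nil => intro d ys h; simpa using h
  | cons c r ih =>
    intro d ys h
    simp only [List.all_cons, Bool.and_eq_true] at hall
    obtain ⟨h1, h2, h3⟩ := digit_ne_special hall.1
    rw [List.cons_append, tfB_other _ _ h1 h2 h3, Bool.and_eq_true] at h
    exact ih hall.2 h.2

theorem netB_digit_append {xs : List Char} (hall : xs.all PySem.Chars.isdigit = true)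
    (ys : List Char) : netB (xs ++ ys) = netB ys := by
  induction xs with
  | nil => rfl
  | cons c r ih =>
    simp only [List.all_cons, Bool.and_eq_true] at hall
    obtain ⟨h1, h2, -⟩ := digit_ne_special hall.1
    rw [List.cons_append, netB_cons, ih hall.2]
    simp [h1, h2]

theorem bScan_skip : ∀ (n : Nat) (cs : List Char), cs.length ≤ n →
    ∀ {d : Int} (orig : List Char) (done T : List (List Char)),
    tfB d cs = true →
    (T = [] ∨ ∃ ts, T = ['['] :: ts) →
    bScan orig done d (tokenizeB cs ++ T) =
      bScan orig ((tokenizeB cs).reverse ++ done) (d + netB cs) T := by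
  intro n
  induction n with
  | zero =>
    intro cs h
    cases cs with
    | nil => intro d orig done T _ _; rw [tok_nil]; simp [netB]
    | cons c r => simp at h
  | succ m ih =>
    intro cs hlen d orig done T htf hT
    cases cs with
    | nil => rw [tok_nil]; simp [netB]
    | cons c r =>
      by_cases hc : PySem.Chars.isdigit c
      · obtain ⟨h1, h2, h3⟩ := digit_ne_special hc
        rw [tfB_other _ _ h1 h2 h3, Bool.and_eq_true, decide_eq_true_eq] at htf
        have hsplit := List.takeWhile_append_dropWhile (p := PySem.Chars.isdigit) (l := r)
        have htfr : tfB d (r.dropWhile PySem.Chars.isdigit) = true := by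
          refine tfB_digit_append (xs := r.takeWhile PySem.Chars.isdigit)
            (by simpa using List.all_takeWhile ..) ?_
          rw [hsplit]; exact htf.2
        have hnet : netB (c :: r) = netB (r.dropWhile PySem.Chars.isdigit) := by
          rw [netB_cons]
          have : netB r = netB (r.dropWhile PySem.Chars.isdigit) := by
            conv_lhs => rw [← hsplit]
            exact netB_digit_append (by simpa using List.all_takeWhile ..) _
          simp [h1, h2, this]
        rw [tok_cons_digit _ hc, List.cons_append]
        rw [bScan_cons_other orig done d _
          (by intro hh; rw [List.cons_eq_cons] at hh; exact h1 hh.1)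
          (by intro hh; rw [List.cons_eq_cons] at hh; exact h2 hh.1)]
        have hlt : (r.dropWhile PySem.Chars.isdigit).length ≤ m := by
          have := List.length_dropWhile_le PySem.Chars.isdigit r
          simp at hlen; omega
        rw [ih _ hlt orig _ T htfr hT]
        rw [hnet]
        congr 1
        simp
      · by_cases hb : c = '['
        · subst hb
          rw [tfB_lb] at htf
          rw [tok_cons_nondigit _ (by simpa using hc), List.cons_append]
          have hstep : bScan orig done d (['['] :: (tokenizeB r ++ T)) =
              bScan orig (['['] :: done) (d + 1) (tokenizeB r ++ T) := by
            by_cases hd5 : 5 ≤ d + 1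
            · refine bScan_cons_lb_nofire orig done d ?_
              cases r with
              | nil =>
                rw [tok_nil, List.nil_append]
                rcases hT with rfl | ⟨ts, rfl⟩
                · exact Or.inl rfl
                · exact Or.inr ⟨['['], ts, rfl, by decide⟩
              | cons c' r' =>
                have hc' : PySem.Chars.isdigit c' = false := by
                  by_contra hcc
                  rw [Bool.not_eq_false] at hcc
                  obtain ⟨g1, g2, g3⟩ := digit_ne_special hcc
                  rw [tfB_other _ _ g1 g2 g3, Bool.and_eq_true, decide_eq_true_eq] at htf
                  omega
                rw [tok_cons_nondigit _ hc', List.cons_append]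
                exact Or.inr ⟨[c'], _, rfl, by simp [PySem.Chars.strIsdigit, hc']⟩
            · exact bScan_cons_lb_low orig done _ hd5
          rw [hstep]
          rw [ih r (by simp at hlen; omega) orig _ T htf hT]
          rw [netB_cons]
          have heq : d + 1 + netB r = d + ((if '[' = '[' then 1 else if '[' = ']' then (-1 : Int) else 0) + netB r) := by
            simp; ring
          rw [← heq]
          congr 1
          simp
        · by_cases hb2 : c = ']'
          · subst hb2
            rw [tfB_rb] at htf
            rw [tok_cons_nondigit _ (by simpa using hc), List.cons_append, bScan_cons_rb]
            rw [ih r (by simp at hlen; omega) orig _ T htf hT]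
            rw [netB_cons]
            have heq : d - 1 + netB r = d + ((if ']' = '[' then 1 else if ']' = ']' then (-1 : Int) else 0) + netB r) := by
              simp; ring
            rw [← heq]
            congr 1
            simp
          · have htfr : tfB d r = true := by
              by_cases hb3 : c = ','
              · subst hb3; rwa [tfB_comma] at htf
              · rw [tfB_other _ _ hb hb2 hb3, Bool.and_eq_true] at htf; exact htf.2
            rw [tok_cons_nondigit _ (by simpa using hc), List.cons_append]
            rw [bScan_cons_other orig done d _
              (by intro hh; rw [List.cons_eq_cons] at hh; exact hb hh.1)
              (by intro hh; rw [List.cons_eq_cons] at hh; exact hb2 hh.1)]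
            rw [ih r (by simp at hlen; omega) orig _ T htfr hT]
            rw [netB_cons]
            have heq : d + netB r = d + ((if c = '[' then 1 else if c = ']' then (-1 : Int) else 0) + netB r) := by
              simp [hb, hb2]
            rw [← heq]
            congr 1
            simp

-- ---------- find / splitOn ----------

theorem find_append_singleton {c : Char} {as : List Char} (h : c ∉ as) (bs : List Char) :
    PySem.Chars.find (as ++ c :: bs) [c] = (as.length : Int) := by
  have hinf : [c] <:+: (as ++ c :: bs) := ⟨as, bs, by simp⟩
  have h0 : 0 ≤ PySem.Chars.find (as ++ c :: bs) [c] := (PySem.Chars.find_nonneg_iff _ _).2 hinf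
  obtain ⟨hpre, hmin⟩ := PySem.Chars.find_spec h0
  have hle : (PySem.Chars.find (as ++ c :: bs) [c]).toNat ≤ as.length := by
    by_contra hgt
    push_neg at hgt
    exact hmin as.length hgt (by rw [List.drop_left]; exact ⟨bs, rfl⟩)
  have hge : ¬ (PySem.Chars.find (as ++ c :: bs) [c]).toNat < as.length := by
    intro hlt
    obtain ⟨t, ht⟩ := hpre
    have hget : (as ++ c :: bs)[(PySem.Chars.find (as ++ c :: bs) [c]).toNat]? = some c := by
      have hd : List.drop (PySem.Chars.find (as ++ c :: bs) [c]).toNat (as ++ c :: bs) = c :: t := by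
        simpa using ht.symm
      have := congrArg List.head? hd
      rwa [List.head?_drop] at this
    rw [List.getElem?_append_left hlt] at hget
    exact h (List.mem_of_getElem? hget)
  omega

theorem find_prefix_zero {sub w : List Char} (hne : sub ≠ []) (hp : sub <+: w) :
    PySem.Chars.find w sub = 0 := by
  have h0 : 0 ≤ PySem.Chars.find w sub := (PySem.Chars.find_nonneg_iff _ _).2 hp.isInfix
  obtain ⟨hpre, hmin⟩ := PySem.Chars.find_spec h0
  have : ¬ 0 < (PySem.Chars.find w sub).toNat := by
    intro hlt
    exact hmin 0 hlt (by simpa using hp)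
  omega

theorem splitOn_two {X Y : List Char} (hx : ',' ∉ X) (hy : ',' ∉ Y) :
    PySem.Chars.splitOn (X ++ ',' :: Y) [','] = [X, Y] := by
  have go_no_sep : ∀ (fuel : Nat) (l : List Char), ',' ∉ l → l.length < fuel →
      ∀ (cur : List Char) (acc : List (List Char)),
      PySem.Chars.splitOn.go [','] fuel l cur acc = ((cur.reverse ++ l) :: acc).reverse := by
    intro fuel
    induction fuel with
    | zero => intro l _ h; omega
    | succ m ih =>
      intro l hl hlen cur acc
      cases l with
      | nil => simp [PySem.Chars.splitOn.go]
      | cons c rest =>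
        have hc : c ≠ ',' := fun hh => hl (hh ▸ List.mem_cons_self)
        have hpf : [','].isPrefixOf (c :: rest) = false := by
          simp [List.isPrefixOf]
          exact fun hh => absurd hh.symm hc
        rw [PySem.Chars.splitOn.go]
        rw [hpf]
        simp only [Bool.false_eq_true, if_false]
        rw [ih rest (fun hm => hl (List.mem_cons_of_mem _ hm)) (by simp at hlen; omega)]
        simp
  have go_sep : ∀ (X' : List Char), ',' ∉ X' → ∀ (fuel : Nat), X'.length < fuel →
      ∀ (Y' cur : List Char) (acc : List (List Char)),
      PySem.Chars.splitOn.go [','] fuel (X' ++ ',' :: Y') cur acc =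
        PySem.Chars.splitOn.go [','] (fuel - (X'.length + 1)) Y' [] ((cur.reverse ++ X') :: acc) := by
    intro X'
    induction X' with
    | nil =>
      intro _ fuel hf Y' cur acc
      cases fuel with
      | zero => omega
      | succ m =>
        rw [List.nil_append, PySem.Chars.splitOn.go]
        have hpf : [','].isPrefixOf (',' :: Y') = true := by simp [List.isPrefixOf]
        rw [hpf]
        simp
    | cons x X'' ih =>
      intro hx fuel hf Y' cur acc
      cases fuel with
      | zero => omega
      | succ m =>
        have hc : x ≠ ',' := fun hh => hx (hh ▸ List.mem_cons_self)
        have hpf : [','].isPrefixOf (x :: (X'' ++ ',' :: Y')) = false := by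
          simp [List.isPrefixOf]
          exact fun hh => absurd hh.symm hc
        rw [List.cons_append, PySem.Chars.splitOn.go]
        rw [hpf]
        simp only [Bool.false_eq_true, if_false]
        rw [ih (fun hm => hx (List.mem_cons_of_mem _ hm)) m (by simp at hf; omega) Y' (x :: cur) acc]
        have harith : m - (X''.length + 1) = m + 1 - ((x :: X'').length + 1) := by simp
        rw [harith]
        simp
  show PySem.Chars.splitOn.go [','] ((X ++ ',' :: Y).length + 1) (X ++ ',' :: Y) [] [] = [X, Y]
  rw [go_sep X hx _ (by simp) Y [] []]
  rw [show (X ++ ',' :: Y).length + 1 - (X.length + 1) = Y.length + 1 by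
    simp only [List.length_append, List.length_cons]; omega]
  rw [go_no_sep _ Y hy (by omega) [] _]
  simp

-- ---------- A left phase ----------

theorem pyGetD_at (A : List Char) (c : Char) (B : List Char) (d : Char) :
    PySem.List.pyGetD (A ++ c :: B) (A.length : Int) d = c := by
  rw [PySem.List.pyGetD_natCast]
  rw [List.getD_eq_getElem?_getD, List.getElem?_append_right (le_refl A.length)]
  simp

theorem aLeft_skip : ∀ (M : List Char), M.all (fun c => !PySem.Chars.isdigit c) = true →
    ∀ (Q T n : List Char) (ptr x : Int), n = Q ++ M ++ T →
    aLeft n ptr x (PySem.List.pyRange ((Q.length : Int) + M.length - 1) (-1) (-1)) =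
      aLeft n ptr x (PySem.List.pyRange ((Q.length : Int) - 1) (-1) (-1)) := by
  intro M
  induction M using List.reverseRecOn with
  | nil => intro _ Q T n ptr x _; simp
  | append_singleton M' c ihM =>
    intro hM Q T n ptr x hn
    simp only [List.all_append, List.all_cons, List.all_nil, Bool.and_eq_true] at hM
    have hc : PySem.Chars.isdigit c = false := by simpa using hM.2.1
    have harg : ((Q.length : Int) + ((M' ++ [c]).length : Int) - 1) = (Q.length : Int) + (M'.length : Int) := by
      simp; push_cast; ring
    rw [harg, PySem.List.pyRange_neg_one_cons (by push_cast; omega)]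
    have hget : PySem.List.pyGetD n ((Q.length : Int) + (M'.length : Int)) ' ' = c := by
      rw [show ((Q.length : Int) + (M'.length : Int)) = (((Q ++ M').length : Nat) : Int) by simp]
      rw [hn, show Q ++ (M' ++ [c]) ++ T = (Q ++ M') ++ c :: T by simp]
      exact pyGetD_at (Q ++ M') c T ' '
    rw [aLeft]
    rw [hget, hc]
    simp only [Bool.false_eq_true, if_false]
    have := ihM hM.1 Q (c :: T) n ptr x (by simp [hn])
    simpa using this

theorem aLeftRun_spec {R : List Char} (hne : R ≠ []) (hall : R.all PySem.Chars.isdigit = true)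
    {L : List Char} (hL : (L = [] ∧ R.length = 1) ∨ (∃ c L', L = L' ++ [c] ∧ PySem.Chars.isdigit c = false))
    (T n : List Char) (hn : n = L ++ R ++ T) :
    aLeftRun n ((L.length : Int) + R.length - 1)
      (PySem.List.pyRange ((L.length : Int) + R.length - 1) (-1) (-1)) = (R, (L.length : Int)) := by
  have hRpos : 0 < R.length := List.length_pos_iff.2 hne
  have aux : ∀ k : Nat, k ≤ R.length →
      aLeftRun n ((L.length : Int) + R.length - 1)
        (PySem.List.pyRange ((L.length : Int) + (k : Int) - 1) (-1) (-1)) = (R, (L.length : Int)) := by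
    intro k
    induction k with
    | zero =>
      intro _
      rcases hL with ⟨rfl, hR1⟩ | ⟨c, L', rfl, hcnd⟩
      · obtain ⟨a, rfl⟩ := List.length_eq_one_iff.1 hR1
        rw [show ((([] : List Char).length : Int) + ((0 : Nat) : Int) - 1) = -1 by simp]
        rw [PySem.List.pyRange_neg_one_eq_nil (by omega)]
        rw [aLeftRun]
        have hget : PySem.List.pyGetD n ((([] : List Char).length : Int) + (([a] : List Char).length : Int) - 1) ' ' = a := by
          rw [show ((([] : List Char).length : Int) + (([a] : List Char).length : Int) - 1) = ((([] : List Char).length : Nat) : Int) by simp]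
          rw [hn]
          exact pyGetD_at [] a T ' '
        rw [hget]
        simp
      · rw [show (((L' ++ [c]).length : Int) + ((0 : Nat) : Int) - 1) = ((L'.length : Nat) : Int) by simp]
        rw [PySem.List.pyRange_neg_one_cons (by omega)]
        rw [aLeftRun]
        have hget : PySem.List.pyGetD n ((L'.length : Nat) : Int) ' ' = c := by
          rw [hn, show (L' ++ [c]) ++ R ++ T = L' ++ c :: (R ++ T) by simp]
          exact pyGetD_at L' c (R ++ T) ' '
        rw [hget, hcnd]
        rw [if_pos (by simp)]
        have hsl : PySem.List.slice n (some ((L'.length : Int) + 1)) (some (((L' ++ [c]).length : Int) + (R.length : Int) - 1 + 1)) = R := by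
          rw [show ((L'.length : Int) + 1) = (((L' ++ [c]).length : Nat) : Int) by simp,
            show (((L' ++ [c]).length : Int) + (R.length : Int) - 1 + 1) = ((((L' ++ [c]).length + R.length : Nat)) : Int) by push_cast; ring]
          rw [PySem.List.slice_natCast]
          rw [hn, show (L' ++ [c]) ++ R ++ T = (L' ++ [c]) ++ (R ++ T) by simp]
          rw [List.drop_left, show (L' ++ [c]).length + R.length - (L' ++ [c]).length = R.length by omega]
          exact List.take_left ..
        rw [hsl]
        refine Prod.ext rfl ?_
        show (L'.length : Int) + 1 = ((L' ++ [c]).length : Int)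
        simp
    | succ k ihk =>
      intro hk
      have hlt : k < R.length := by omega
      rw [show ((L.length : Int) + ((k + 1 : Nat) : Int) - 1) = ((L.length : Int) + (k : Int)) by push_cast; ring]
      rw [PySem.List.pyRange_neg_one_cons (by push_cast; omega)]
      rw [aLeftRun]
      have hR : R.take k ++ R[k] :: R.drop (k + 1) = R := by
        rw [List.getElem_cons_drop]
        exact List.take_append_drop k R
      have hdecomp : (L ++ R.take k) ++ R[k] :: (R.drop (k + 1) ++ T) = n := by
        rw [hn]
        conv_rhs => rw [← hR]
        simp only [List.append_assoc, List.cons_append]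
      have hget : PySem.List.pyGetD n ((L.length : Int) + (k : Int)) ' ' = R[k] := by
        rw [show ((L.length : Int) + (k : Int)) = (((L ++ R.take k).length : Nat) : Int) by
          simp [List.length_take]; omega]
        rw [← hdecomp]
        exact pyGetD_at (L ++ R.take k) (R[k]) (R.drop (k + 1) ++ T) ' '
      rw [hget]
      have hdig : PySem.Chars.isdigit R[k] = true := List.all_eq_true.1 hall _ (R.getElem_mem hlt)
      rw [hdig]
      simp only [Bool.not_true, Bool.false_eq_true, if_false]
      have := ihk (by omega)
      rwa [show ((L.length : Int) + (k : Int) - 1) = ((L.length : Int) + ((k : Nat) : Int) - 1) by push_cast; ring] at this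
  have hfin := aux R.length (le_refl _)
  rwa [show ((L.length : Int) + ((R.length : Nat) : Int) - 1) = ((L.length : Int) + (R.length : Int) - 1) by push_cast; ring] at hfin

theorem aLeft_fire {L R M T n : List Char} {ptr x : Int}
    (hne : R ≠ []) (hall : R.all PySem.Chars.isdigit = true)
    (hL : (L = [] ∧ R.length = 1) ∨ (∃ c L', L = L' ++ [c] ∧ PySem.Chars.isdigit c = false))
    (hM : M.all (fun c => !PySem.Chars.isdigit c) = true)
    (hn : n = L ++ R ++ M ++ T) :
    aLeft n ptr x (PySem.List.pyRange ((L.length : Int) + R.length - 1) (-1) (-1)) =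
      (L ++ PySem.Int.toChars ((PySem.Int.ofChars? R).getD 0 + x) ++ (M ++ T),
       ptr + ((PySem.Int.toChars ((PySem.Int.ofChars? R).getD 0 + x)).length - (R.length : Int)),
       (PySem.Int.toChars ((PySem.Int.ofChars? R).getD 0 + x)).length - (R.length : Int)) := by
  have hRpos : 0 < R.length := List.length_pos_iff.2 hne
  rw [PySem.List.pyRange_neg_one_cons (by push_cast; omega)]
  rw [aLeft]
  obtain ⟨R', a, hRa⟩ : ∃ R' a, R = R' ++ [a] := by
    rcases List.eq_nil_or_concat R with rfl | ⟨R', a, h⟩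
    · exact absurd rfl hne
    · exact ⟨R', a, by simpa [List.concat_eq_append] using h⟩
  have hget : PySem.List.pyGetD n ((L.length : Int) + (R.length : Int) - 1) ' ' = a := by
    rw [show ((L.length : Int) + (R.length : Int) - 1) = (((L ++ R').length : Nat) : Int) by
      rw [hRa]
      simp only [List.length_append, List.length_cons, List.length_nil]
      push_cast; ring]
    rw [hn, hRa, show L ++ (R' ++ [a]) ++ M ++ T = (L ++ R') ++ a :: (M ++ T) by simp]
    exact pyGetD_at (L ++ R') a (M ++ T) ' '
  have hdig : PySem.Chars.isdigit a = true :=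
    List.all_eq_true.1 hall _ (by rw [hRa]; simp)
  rw [hget, hdig]
  rw [if_pos rfl]
  have hrun : aLeftRun n ((L.length : Int) + (R.length : Int) - 1)
      (PySem.List.pyRange ((L.length : Int) + (R.length : Int) - 1) (-1) (-1)) = (R, (L.length : Int)) :=
    aLeftRun_spec hne hall hL (M ++ T) n (by simp [hn])
  simp only [hrun]
  have hs1 : PySem.List.slice n none (some ((L.length : Int))) = L := by
    rw [show ((L.length : Int)) = ((L.length : Nat) : Int) by simp, PySem.List.slice_to_natCast]
    rw [hn, show L ++ R ++ M ++ T = L ++ (R ++ M ++ T) by simp]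
    exact List.take_left ..
  have hs2 : PySem.List.slice n (some ((L.length : Int) + (R.length : Int) - 1 + 1)) none = M ++ T := by
    rw [show ((L.length : Int) + (R.length : Int) - 1 + 1) = (((L ++ R).length : Nat) : Int) by
      simp only [List.length_append]; push_cast; ring]
    rw [PySem.List.slice_from_natCast]
    rw [hn, show L ++ R ++ M ++ T = (L ++ R) ++ (M ++ T) by simp]
    exact List.drop_left ..
  rw [hs1, hs2]

-- ---------- A right phase ----------

theorem aRight_skip : ∀ (M : List Char), M.all (fun c => !PySem.Chars.isdigit c) = true →
    ∀ (Q T n : List Char) (y : Int), n = Q ++ M ++ T →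
    aRight n y (PySem.List.pyRange (Q.length : Int) (n.length : Int) 1) =
      aRight n y (PySem.List.pyRange ((Q.length : Int) + M.length) (n.length : Int) 1) := by
  intro M
  induction M with
  | nil => intro _ Q T n y _; simp
  | cons c M' ihM =>
    intro hM Q T n y hn
    simp only [List.all_cons, Bool.and_eq_true] at hM
    have hc : PySem.Chars.isdigit c = false := by simpa using hM.1
    have hlen : Q.length < n.length := by rw [hn]; simp
    rw [PySem.List.pyRange_one_cons (by exact_mod_cast hlen)]
    rw [aRight]
    have hget : PySem.List.pyGetD n ((Q.length : Nat) : Int) ' ' = c := by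
      rw [hn, show Q ++ (c :: M') ++ T = Q ++ c :: (M' ++ T) by simp]
      exact pyGetD_at Q c (M' ++ T) ' '
    rw [hget, hc]
    simp only [Bool.false_eq_true, if_false]
    have := ihM hM.2 (Q ++ [c]) T n y (by simp [hn])
    rw [show ((Q.length : Int) + 1) = (((Q ++ [c]).length : Nat) : Int) by simp] at *
    rw [this]
    congr 1
    simp
    push_cast
    ring

theorem aRightRun_spec {R : List Char} (hne : R ≠ []) (hall : R.all PySem.Chars.isdigit = true)
    {T : List Char} (hT : (T = [] ∧ R.length = 1) ∨ (∃ c T', T = c :: T' ∧ PySem.Chars.isdigit c = false))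
    (W n : List Char) (hn : n = W ++ R ++ T) :
    aRightRun n (W.length : Int) (PySem.List.pyRange (W.length : Int) (n.length : Int) 1) = R := by
  have hRpos : 0 < R.length := List.length_pos_iff.2 hne
  have aux : ∀ m k : Nat, k + m = R.length →
      aRightRun n (W.length : Int) (PySem.List.pyRange ((W.length : Int) + (k : Int)) (n.length : Int) 1) = R := by
    intro m
    induction m with
    | zero =>
      intro k hk
      have hkR : k = R.length := by omega
      subst hkR
      rcases hT with ⟨rfl, hR1⟩ | ⟨c, T', rfl, hcnd⟩
      · have hlen : n.length = W.length + R.length := by rw [hn]; simp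
        rw [show ((W.length : Int) + (R.length : Int)) = ((n.length : Nat) : Int) by rw [hlen]; push_cast; ring]
        rw [PySem.List.pyRange_one_eq_nil (le_refl _)]
        rw [aRightRun]
        obtain ⟨a, rfl⟩ := List.length_eq_one_iff.1 hR1
        have hget : PySem.List.pyGetD n ((W.length : Nat) : Int) ' ' = a := by
          rw [hn, show W ++ [a] ++ [] = W ++ a :: [] by simp]
          exact pyGetD_at W a [] ' '
        rw [hget]
      · have hlen : (W.length + R.length) < n.length := by rw [hn]; simp
        rw [show ((W.length : Int) + (R.length : Int)) = (((W.length + R.length : Nat)) : Int) by push_cast; ring]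
        rw [PySem.List.pyRange_one_cons (by exact_mod_cast hlen)]
        rw [aRightRun]
        have hget : PySem.List.pyGetD n (((W.length + R.length : Nat)) : Int) ' ' = c := by
          rw [hn, show W ++ R ++ c :: T' = (W ++ R) ++ c :: T' by simp,
            show W.length + R.length = (W ++ R).length by simp]
          exact pyGetD_at (W ++ R) c T' ' '
        rw [hget, hcnd]
        rw [if_pos (by simp)]
        rw [show (((W.length + R.length : Nat)) : Int) = ((W.length : Nat) : Int) + ((R.length : Nat) : Int) by push_cast; ring]
        rw [show ((W.length : Nat) : Int) + ((R.length : Nat) : Int) = (((W.length + R.length : Nat)) : Int) by push_cast; ring]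
        rw [PySem.List.slice_natCast]
        rw [hn, show W ++ R ++ c :: T' = W ++ (R ++ c :: T') by simp]
        rw [List.drop_left, show W.length + R.length - W.length = R.length by omega]
        exact List.take_left ..
    | succ m ihm =>
      intro k hk
      have hlt : k < R.length := by omega
      have hlen : W.length + k < n.length := by rw [hn]; simp; omega
      rw [show ((W.length : Int) + (k : Int)) = (((W.length + k : Nat)) : Int) by push_cast; ring]
      rw [PySem.List.pyRange_one_cons (by exact_mod_cast hlen)]
      rw [aRightRun]
      have hR : R.take k ++ R[k] :: R.drop (k + 1) = R := by
        rw [List.getElem_cons_drop]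
        exact List.take_append_drop k R
      have hdecomp : (W ++ R.take k) ++ R[k] :: (R.drop (k + 1) ++ T) = n := by
        rw [hn]
        conv_rhs => rw [← hR]
        simp only [List.append_assoc, List.cons_append]
      have hget : PySem.List.pyGetD n (((W.length + k : Nat)) : Int) ' ' = R[k] := by
        rw [show (W.length + k) = (W ++ R.take k).length by simp [List.length_take]; omega]
        rw [← hdecomp]
        exact pyGetD_at (W ++ R.take k) (R[k]) (R.drop (k + 1) ++ T) ' '
      rw [hget]
      have hdig : PySem.Chars.isdigit R[k] = true := List.all_eq_true.1 hall _ (R.getElem_mem hlt)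
      rw [hdig]
      simp only [Bool.not_true, Bool.false_eq_true, if_false]
      have := ihm (k + 1) (by omega)
      rwa [show ((W.length : Int) + ((k + 1 : Nat) : Int)) = (((W.length + k : Nat)) : Int) + 1 by push_cast; ring] at this
  have := aux R.length 0 (by omega)
  simpa using this

theorem aRight_fire {W R T n : List Char} {y : Int}
    (hne : R ≠ []) (hall : R.all PySem.Chars.isdigit = true)
    (hT : (T = [] ∧ R.length = 1) ∨ (∃ c T', T = c :: T' ∧ PySem.Chars.isdigit c = false))
    (hn : n = W ++ R ++ T) :
    aRight n y (PySem.List.pyRange (W.length : Int) (n.length : Int) 1) =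
      W ++ PySem.Int.toChars ((PySem.Int.ofChars? R).getD 0 + y) ++ T := by
  obtain ⟨a, R', rfl⟩ := List.exists_cons_of_ne_nil hne
  have hlen : W.length < n.length := by rw [hn]; simp
  rw [PySem.List.pyRange_one_cons (by exact_mod_cast hlen)]
  rw [aRight]
  have hget : PySem.List.pyGetD n ((W.length : Nat) : Int) ' ' = a := by
    rw [hn, show W ++ (a :: R') ++ T = W ++ a :: (R' ++ T) by simp]
    exact pyGetD_at W a (R' ++ T) ' '
  have hdig : PySem.Chars.isdigit a = true := by
    have := List.all_eq_true.1 hall a (by simp)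
    simpa using this
  rw [hget, hdig, if_pos rfl]
  have hrun : aRightRun n (W.length : Int) (PySem.List.pyRange (W.length : Int) (n.length : Int) 1) = a :: R' :=
    aRightRun_spec hne hall hT W n hn
  simp only [hrun]
  have hs1 : PySem.List.slice n none (some ((W.length : Int))) = W := by
    rw [show ((W.length : Int)) = ((W.length : Nat) : Int) by simp, PySem.List.slice_to_natCast]
    rw [hn, show W ++ a :: R' ++ T = W ++ (a :: R' ++ T) by simp]
    exact List.take_left ..
  have hs2 : PySem.List.slice n (some ((W.length : Int) + ((a :: R').length : Int))) none = T := by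
    rw [show ((W.length : Int) + ((a :: R').length : Int)) = (((W ++ a :: R').length : Nat) : Int) by
      simp]
    rw [PySem.List.slice_from_natCast]
    rw [hn, show W ++ (a :: R') ++ T = (W ++ a :: R') ++ T by simp]
    exact List.drop_left ..
  rw [hs1, hs2]

-- ---------- bumps ----------

theorem bumpFirstB_skip {toks : List (List Char)}
    (h : toks.all (fun t => !PySem.Chars.strIsdigit t) = true) (rest : List (List Char)) (y : Int) :
    bumpFirstB (toks ++ rest) y = toks ++ bumpFirstB rest y := by
  induction toks with
  | nil => simp
  | cons t ts ih =>
    simp only [List.all_cons, Bool.and_eq_true] at h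
    have h1 : PySem.Chars.strIsdigit t = false := by simpa using h.1
    simp [bumpFirstB, h1, ih h.2]

theorem bumpFirstB_id {toks : List (List Char)}
    (h : toks.all (fun t => !PySem.Chars.strIsdigit t) = true) (y : Int) :
    bumpFirstB toks y = toks := by
  have := bumpFirstB_skip h [] y
  simpa [bumpFirstB] using this

theorem bumpFirstB_fire {R : List Char} (hR : PySem.Chars.strIsdigit R = true)
    (rest : List (List Char)) (y : Int) :
    bumpFirstB (R :: rest) y = PySem.Int.toChars ((PySem.Int.ofChars? R).getD 0 + y) :: rest := by
  simp [bumpFirstB, hR]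

theorem digitfree_toks {M : List Char} (h : M.all (fun c => !PySem.Chars.isdigit c) = true) :
    (tokenizeB M).all (fun t => !PySem.Chars.strIsdigit t) = true := by
  rw [tok_digitfree h]
  rw [List.all_map]
  refine List.all_eq_true.2 ?_
  intro c hc
  have := List.all_eq_true.1 h c hc
  simp only [Function.comp]
  simp [PySem.Chars.strIsdigit]
  simpa using this

theorem strIsdigit_of_run {R : List Char} (hne : R ≠ []) (hall : R.all PySem.Chars.isdigit = true) :
    PySem.Chars.strIsdigit R = true := by
  simp [PySem.Chars.strIsdigit, hall, hne]

-- ---------- assembly helpers ----------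

theorem no_special_of_digits {R : List Char} (h : R.all PySem.Chars.isdigit = true) :
    (']' ∉ R) ∧ (',' ∉ R) := by
  constructor <;> intro hm <;> exact absurd (List.all_eq_true.1 h _ hm) (by decide)

theorem takeWhile_digit_nil_of_nondigit {M : List Char}
    (h : M.all (fun c => !PySem.Chars.isdigit c) = true) :
    M.takeWhile PySem.Chars.isdigit = [] := by
  refine takeWhile_nil_of_head ?_
  intro c cs hc
  subst hc
  simpa using (List.all_eq_true.1 h c (by simp))

theorem splitFirst (S : List Char) :
    S.all (fun c => !PySem.Chars.isdigit c) = true ∨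
    ∃ M2 R2 T2, S = M2 ++ R2 ++ T2 ∧
      M2.all (fun c => !PySem.Chars.isdigit c) = true ∧ R2 ≠ [] ∧
      R2.all PySem.Chars.isdigit = true ∧
      (T2 = [] ∨ ∃ c T', T2 = c :: T' ∧ PySem.Chars.isdigit c = false) ∧
      (T2 = [] → 2 ≤ R2.length → edgeRB S = true) := by
  set p : Char → Bool := fun c => !PySem.Chars.isdigit c with hp
  cases hrest : S.dropWhile p with
  | nil =>
    left
    have := List.takeWhile_append_dropWhile (p := p) (l := S)
    rw [hrest, List.append_nil] at this
    rw [← this]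
    simpa using List.all_takeWhile ..
  | cons d ds =>
    right
    have hd : PySem.Chars.isdigit d = true := by
      have := List.head_dropWhile_not (p := p) (l := S)
      rw [hrest] at this
      simpa [hp] using this (by simp)
    refine ⟨S.takeWhile p, (d :: ds).takeWhile PySem.Chars.isdigit,
      (d :: ds).dropWhile PySem.Chars.isdigit, ?_, ?_, ?_, ?_, ?_, ?_⟩
    · conv_lhs => rw [← List.takeWhile_append_dropWhile (p := p) (l := S)]
      rw [hrest, List.append_assoc, List.takeWhile_append_dropWhile]
    · simpa using List.all_takeWhile ..
    · simp [List.takeWhile_cons, hd]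
    · simpa using List.all_takeWhile ..
    · cases hdw : (d :: ds).dropWhile PySem.Chars.isdigit with
      | nil => exact Or.inl rfl
      | cons c T' =>
        refine Or.inr ⟨c, T', rfl, ?_⟩
        have := List.head_dropWhile_not (p := PySem.Chars.isdigit) (l := d :: ds)
        rw [hdw] at this
        simpa using this (by simp)
    · intro hT2 hlen
      have hrun : (d :: ds).takeWhile PySem.Chars.isdigit = d :: ds := by
        have h2 := List.takeWhile_append_dropWhile (p := PySem.Chars.isdigit) (l := d :: ds)
        rw [hT2, List.append_nil] at h2
        exact h2
      have hall : (d :: ds).all PySem.Chars.isdigit = true := by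
        rw [← hrun]
        simpa using List.all_takeWhile ..
      have hlen2 : 2 ≤ (d :: ds).length := by rw [← hrun]; exact hlen
      have hS : S.dropWhile (fun c => !PySem.Chars.isdigit c) = d :: ds := by
        rw [← hp]; exact hrest
      simp only [edgeRB, hS, Bool.and_eq_true, decide_eq_true_eq]
      exact ⟨hlen2, hall⟩

theorem splitLast (P : List Char) :
    P.all (fun c => !PySem.Chars.isdigit c) = true ∨
    ∃ L R M, P = L ++ R ++ M ∧
      M.all (fun c => !PySem.Chars.isdigit c) = true ∧ R ≠ [] ∧
      R.all PySem.Chars.isdigit = true ∧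
      (L = [] ∨ ∃ c L', L = L' ++ [c] ∧ PySem.Chars.isdigit c = false) ∧
      (L = [] → 2 ≤ R.length → edgeLB P = true) := by
  rcases splitFirst P.reverse with hall | ⟨M2, R2, T2, heq, hM2, hR2ne, hR2d, hT2, _⟩
  · left
    rw [← List.all_reverse]
    exact hall
  · right
    refine ⟨T2.reverse, R2.reverse, M2.reverse, ?_, ?_, ?_, ?_, ?_, ?_⟩
    · have := congrArg List.reverse heq
      rw [List.reverse_reverse] at this
      rw [this]
      simp
    · rw [List.all_reverse]; exact hM2
    · simpa using hR2ne
    · rw [List.all_reverse]; exact hR2d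
    · rcases hT2 with rfl | ⟨c, T', rfl, hc⟩
      · exact Or.inl rfl
      · exact Or.inr ⟨c, T'.reverse, by simp, hc⟩
    · intro hLnil hlen
      have hT2nil : T2 = [] := by simpa using congrArg List.reverse hLnil
      subst hT2nil
      have hPrev : P = R2.reverse ++ M2.reverse := by
        have := congrArg List.reverse heq
        rw [List.reverse_reverse] at this
        rw [this]
        simp
      rw [edgeLB, hPrev]
      obtain ⟨h1, h2⟩ := takeWhile_all_append (p := PySem.Chars.isdigit)
        (xs := R2.reverse) (ys := M2.reverse)
        (by rw [List.all_reverse]; exact hR2d)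
        (takeWhile_digit_nil_of_nondigit (by rw [List.all_reverse]; exact hM2))
      rw [h1, h2]
      simp only [Bool.and_eq_true, decide_eq_true_eq]
      refine ⟨by simpa using hlen, by rw [List.all_reverse]; exact hM2⟩

theorem patChk_inv {r : List Char} (h : patChk r = true) :
    ∃ X Y S, r = X ++ ',' :: (Y ++ ']' :: S) ∧ X ≠ [] ∧ X.all PySem.Chars.isdigit = true ∧
      Y ≠ [] ∧ Y.all PySem.Chars.isdigit = true ∧
      PySem.Int.toChars ((PySem.Int.ofChars? X).getD 0) = X ∧
      PySem.Int.toChars ((PySem.Int.ofChars? Y).getD 0) = Y ∧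
      sOf r = S := by
  rw [patChk] at h
  cases hdw : r.dropWhile PySem.Chars.isdigit with
  | nil => rw [hdw] at h; simp at h
  | cons d r2 =>
    rw [hdw] at h
    by_cases hd : d = ','
    · subst hd
      simp only at h
      cases hdw2 : r2.dropWhile PySem.Chars.isdigit with
      | nil => rw [hdw2] at h; simp at h
      | cons e S0 =>
        rw [hdw2] at h
        by_cases he : e = ']'
        · subst he
          simp only at h
          simp only [Bool.and_eq_true] at h
          obtain ⟨⟨⟨hx1, hy1⟩, hcx⟩, hcy⟩ := h
          refine ⟨r.takeWhile PySem.Chars.isdigit, r2.takeWhile PySem.Chars.isdigit, S0,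
            ?_, ?_, by simpa using List.all_takeWhile .., ?_, by simpa using List.all_takeWhile ..,
            ?_, ?_, ?_⟩
          · conv_lhs => rw [← List.takeWhile_append_dropWhile (p := PySem.Chars.isdigit) (l := r)]
            rw [hdw]
            congr 1
            congr 1
            conv_lhs => rw [← List.takeWhile_append_dropWhile (p := PySem.Chars.isdigit) (l := r2)]
            rw [hdw2]
          · simpa using hx1
          · simpa using hy1
          · exact eq_of_beq hcx
          · exact eq_of_beq hcy
          · rw [sOf, hdw]
            simp [hdw2]
        · exfalso
          revert h
          cases e <;> simp [he]
    · exfalso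
      revert h
      cases d <;> simp [hd]

theorem tok_prepend_nondigit {M : List Char}
    (hM : M.all (fun c => !PySem.Chars.isdigit c) = true) (rest : List Char) :
    tokenizeB (M ++ rest) = M.map (fun c => [c]) ++ tokenizeB rest := by
  induction M with
  | nil => simp
  | cons c M' ih =>
    simp only [List.all_cons, Bool.and_eq_true] at hM
    rw [List.cons_append, tok_cons_nondigit _ (by simpa using hM.1), ih hM.2, List.map_cons,
      List.cons_append]

theorem map_singleton_nonnum {M : List Char}
    (hM : M.all (fun c => !PySem.Chars.isdigit c) = true) :
    (M.map (fun c => [c])).all (fun t => !PySem.Chars.strIsdigit t) = true := by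
  rw [List.all_map]
  refine List.all_eq_true.2 ?_
  intro c hc
  have := List.all_eq_true.1 hM c hc
  simp only [Function.comp]
  simp [PySem.Chars.strIsdigit]
  simpa using this

theorem tokP_decomp {L R M : List Char}
    (hLe : L = [] ∨ ∃ c L', L = L' ++ [c] ∧ PySem.Chars.isdigit c = false)
    (hRne : R ≠ []) (hRd : R.all PySem.Chars.isdigit = true)
    (hM : M.all (fun c => !PySem.Chars.isdigit c) = true) :
    tokenizeB (L ++ R ++ M) = tokenizeB L ++ R :: tokenizeB M := by
  have hrm : tokenizeB (R ++ M) = R :: tokenizeB M :=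
    tok_run_append hRne hRd (takeWhile_digit_nil_of_nondigit hM)
  rcases hLe with rfl | ⟨c, L', rfl, hc⟩
  · simpa using hrm
  · have h1 : tokenizeB ((L' ++ [c]) ++ R ++ M) = tokenizeB L' ++ tokenizeB (c :: (R ++ M)) := by
      rw [show (L' ++ [c]) ++ R ++ M = L' ++ (c :: (R ++ M)) by simp]
      exact tok_append (by simp [List.takeWhile_cons, hc]) L'.length L' (le_refl _)
    have h2 : tokenizeB (L' ++ [c]) = tokenizeB L' ++ [[c]] := by
      rw [tok_append (by simp [List.takeWhile_cons, hc]) L'.length L' (le_refl _)]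
      rw [tok_cons_nondigit _ hc, tok_nil]
    rw [h1, tok_cons_nondigit _ hc, hrm, h2]
    simp

theorem bump_last_join {L R M : List Char} (x : Int)
    (hLe : L = [] ∨ ∃ c L', L = L' ++ [c] ∧ PySem.Chars.isdigit c = false)
    (hRne : R ≠ []) (hRd : R.all PySem.Chars.isdigit = true)
    (hM : M.all (fun c => !PySem.Chars.isdigit c) = true) :
    PySem.Chars.join [] (bumpLastB (tokenizeB (L ++ R ++ M)) x) =
      L ++ PySem.Int.toChars ((PySem.Int.ofChars? R).getD 0 + x) ++ M := by
  rw [tokP_decomp hLe hRne hRd hM]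
  rw [bumpLastB]
  rw [show (tokenizeB L ++ R :: tokenizeB M).reverse =
    (tokenizeB M).reverse ++ R :: (tokenizeB L).reverse by simp]
  rw [bumpFirstB_skip (by rw [List.all_reverse]; exact digitfree_toks hM) _ x]
  rw [bumpFirstB_fire (strIsdigit_of_run hRne hRd) _ x]
  rw [join_nil_flatten]
  simp only [List.reverse_append, List.reverse_cons, List.reverse_reverse, List.append_assoc,
    List.flatten_append, List.flatten_cons, List.flatten_nil]
  rw [flatten_tok L.length L (le_refl _), flatten_tok M.length M (le_refl _)]
  simp

theorem bump_last_join_nodigit {P : List Char} (x : Int)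
    (hP : P.all (fun c => !PySem.Chars.isdigit c) = true) :
    PySem.Chars.join [] (bumpLastB (tokenizeB P) x) = P := by
  rw [bumpLastB, bumpFirstB_id (by rw [List.all_reverse]; exact digitfree_toks hP), List.reverse_reverse]
  rw [join_nil_flatten, flatten_tok P.length P (le_refl _)]

theorem bump_first_join {M2 R2 T2 : List Char} (y : Int)
    (hM2 : M2.all (fun c => !PySem.Chars.isdigit c) = true)
    (hR2ne : R2 ≠ []) (hR2d : R2.all PySem.Chars.isdigit = true)
    (hT2 : T2.takeWhile PySem.Chars.isdigit = []) :
    PySem.Chars.join [] (bumpFirstB (tokenizeB (M2 ++ R2 ++ T2)) y) =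
      M2 ++ PySem.Int.toChars ((PySem.Int.ofChars? R2).getD 0 + y) ++ T2 := by
  rw [show M2 ++ R2 ++ T2 = M2 ++ (R2 ++ T2) by simp, tok_prepend_nondigit hM2]
  rw [tok_run_append hR2ne hR2d hT2]
  rw [bumpFirstB_skip (map_singleton_nonnum hM2) _ y]
  rw [bumpFirstB_fire (strIsdigit_of_run hR2ne hR2d) _ y]
  rw [join_nil_flatten]
  rw [List.flatten_append, List.flatten_cons]
  rw [show (M2.map fun c => [c]).flatten = M2 by
    rw [← join_nil_flatten]; exact PySem.Chars.join_nil_singletons M2]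
  rw [flatten_tok T2.length T2 (le_refl _)]
  simp

theorem bump_first_join_nodigit {S : List Char} (y : Int)
    (hS : S.all (fun c => !PySem.Chars.isdigit c) = true) :
    PySem.Chars.join [] (bumpFirstB (tokenizeB S) y) = S := by
  rw [bumpFirstB_id (digitfree_toks hS), join_nil_flatten, flatten_tok S.length S (le_refl _)]

theorem bScan_fire (orig : List Char) (done : List (List Char)) {depth : Int}
    (X Y : List Char) (tokS : List (List Char)) (hd5 : 5 ≤ depth + 1)
    (hX : PySem.Chars.strIsdigit X = true) (hY : PySem.Chars.strIsdigit Y = true) :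
    bScan orig done depth (['['] :: X :: [','] :: Y :: [']'] :: tokS) =
      PySem.Chars.join []
        (bumpLastB done.reverse ((PySem.Int.ofChars? X).getD 0) ++
          ['0'] :: bumpFirstB tokS ((PySem.Int.ofChars? Y).getD 0)) := by
  simp [bScan, hd5, hX, hY]

theorem left_phase (P : List Char) (x ptr : Int) (hEL : edgeLB P = false) (rest : List Char) :
    ∃ PL : List Char,
      aLeft (P ++ '[' :: rest) ptr x
          (PySem.List.pyRange ((P.length : Int) + 1 - 1) (-1) (-1)) =
        (PL ++ '[' :: rest, ptr + ((PL.length : Int) - (P.length : Int)),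
          (PL.length : Int) - (P.length : Int)) ∧
      PySem.Chars.join [] (bumpLastB (tokenizeB P) x) = PL := by
  have hbr : PySem.Chars.isdigit '[' = false := by decide
  rcases splitLast P with hPall | ⟨L, R, M, hPeq, hMnd, hRne, hRd, hLe, hLedge⟩
  · refine ⟨P, ?_, bump_last_join_nodigit x hPall⟩
    have hsk := aLeft_skip (P ++ ['[']) (by simp [List.all_append, hPall, hbr]) [] rest
      (P ++ '[' :: rest) ptr x (by simp)
    rw [show ((P.length : Int) + 1 - 1) =
      ((([] : List Char).length : Int) + ((P ++ ['[']).length : Int) - 1) by simp]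
    rw [hsk]
    rw [show ((([] : List Char).length : Int) - 1) = (-1 : Int) by simp]
    rw [PySem.List.pyRange_neg_one_eq_nil (by omega)]
    rw [aLeft]
    simp
  · subst hPeq
    set newR := PySem.Int.toChars ((PySem.Int.ofChars? R).getD 0 + x) with hnewR
    refine ⟨L ++ newR ++ M, ?_, bump_last_join x hLe hRne hRd hMnd⟩
    have hLcase : (L = [] ∧ R.length = 1) ∨
        (∃ c L', L = L' ++ [c] ∧ PySem.Chars.isdigit c = false) := by
      rcases hLe with rfl | h
      · left
        refine ⟨rfl, ?_⟩
        have hRpos : 0 < R.length := List.length_pos_iff.2 hRne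
        by_contra hlen
        have : edgeLB ([] ++ R ++ M) = true := hLedge rfl (by omega)
        rw [this] at hEL
        exact absurd hEL (by simp)
      · exact Or.inr h
    have hsk := aLeft_skip (M ++ ['[']) (by simp [List.all_append, hMnd, hbr]) (L ++ R) rest
      (L ++ R ++ M ++ '[' :: rest) ptr x (by simp)
    rw [show (((L ++ R ++ M).length : Int) + 1 - 1) =
      (((L ++ R).length : Int) + ((M ++ ['[']).length : Int) - 1) by
        simp only [List.length_append, List.length_cons, List.length_nil]; push_cast; ring]
    rw [hsk]
    have hfire := aLeft_fire (ptr := ptr) (x := x) hRne hRd hLcase hMnd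
      (rfl : L ++ R ++ M ++ '[' :: rest = L ++ R ++ M ++ '[' :: rest)
    rw [show (((L ++ R).length : Int) - 1) = ((L.length : Int) + (R.length : Int) - 1) by
      simp only [List.length_append]; push_cast; ring]
    rw [hfire]
    rw [← hnewR]
    simp only [Prod.mk.injEq]
    refine ⟨by simp, ?_, ?_⟩ <;>
    · simp only [List.length_append]
      push_cast
      ring
theorem right_phase (S : List Char) (y : Int) (hER : edgeRB S = false) (W : List Char) :
    ∃ SR : List Char,
      aRight (W ++ ']' :: S) y
          (PySem.List.pyRange (W.length : Int) (((W ++ ']' :: S).length : Nat) : Int) 1) =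
        W ++ ']' :: SR ∧
      PySem.Chars.join [] (bumpFirstB (tokenizeB S) y) = SR := by
  have hbr : PySem.Chars.isdigit ']' = false := by decide
  rcases splitFirst S with hSall | ⟨M2, R2, T2, hSeq, hM2, hR2ne, hR2d, hT2, hredge⟩
  · refine ⟨S, ?_, bump_first_join_nodigit y hSall⟩
    have hsk := aRight_skip (']' :: S) (by simp [hSall, hbr]) W []
      (W ++ ']' :: S) y (by simp)
    rw [hsk]
    rw [show ((W.length : Int) + ((']' :: S).length : Int)) = (((W ++ ']' :: S).length : Nat) : Int) by
      simp]
    rw [PySem.List.pyRange_one_eq_nil (le_refl _)]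
    rw [aRight]
  · subst hSeq
    set newR2 := PySem.Int.toChars ((PySem.Int.ofChars? R2).getD 0 + y) with hnewR2
    have hT2case : (T2 = [] ∧ R2.length = 1) ∨
        (∃ c T', T2 = c :: T' ∧ PySem.Chars.isdigit c = false) := by
      rcases hT2 with rfl | h
      · left
        refine ⟨rfl, ?_⟩
        have hRpos : 0 < R2.length := List.length_pos_iff.2 hR2ne
        by_contra hlen
        have : edgeRB (M2 ++ R2 ++ []) = true := hredge rfl (by omega)
        rw [this] at hER
        exact absurd hER (by simp)
      · exact Or.inr h
    refine ⟨M2 ++ newR2 ++ T2, ?_, ?_⟩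
    · have hsk := aRight_skip (']' :: M2) (by simp [hM2, hbr]) W (R2 ++ T2)
        (W ++ ']' :: (M2 ++ R2 ++ T2)) y (by simp)
      rw [hsk]
      have hfire := aRight_fire (y := y) hR2ne hR2d hT2case
        (show W ++ ']' :: (M2 ++ R2 ++ T2) = (W ++ ']' :: M2) ++ R2 ++ T2 by simp)
      rw [show ((W.length : Int) + ((']' :: M2).length : Int)) = (((W ++ ']' :: M2).length : Nat) : Int) by
        simp]
      rw [hfire, ← hnewR2]
      simp
    · refine Eq.trans (bump_first_join y hM2 hR2ne hR2d ?_) (by rw [← hnewR2])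
      rcases hT2case with ⟨rfl, _⟩ | ⟨c, T', rfl, hc⟩
      · rfl
      · simp [List.takeWhile_cons, hc]

theorem main_found {P X Y S : List Char}
    (htf : tfB 0 P = true) (hd5 : 5 ≤ 0 + netB P + 1)
    (hXne : X ≠ []) (hXd : X.all PySem.Chars.isdigit = true)
    (hYne : Y ≠ []) (hYd : Y.all PySem.Chars.isdigit = true)
    (hcx : PySem.Int.toChars ((PySem.Int.ofChars? X).getD 0) = X)
    (hcy : PySem.Int.toChars ((PySem.Int.ofChars? Y).getD 0) = Y)
    (hEL : edgeLB P = false) (hER : edgeRB S = false) :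
    aScan (P ++ '[' :: (X ++ ',' :: (Y ++ ']' :: S)))
        (PySem.List.enumerate (P ++ '[' :: (X ++ ',' :: (Y ++ ']' :: S))) 0) 0 =
      bScan (P ++ '[' :: (X ++ ',' :: (Y ++ ']' :: S))) [] 0
        (tokenizeB (P ++ '[' :: (X ++ ',' :: (Y ++ ']' :: S)))) := by
  obtain ⟨x0, X0, hX⟩ := List.exists_cons_of_ne_nil hXne
  set cs := P ++ '[' :: (X ++ ',' :: (Y ++ ']' :: S)) with hcs
  have hx0d : PySem.Chars.isdigit x0 = true := by
    have := List.all_eq_true.1 hXd x0 (by rw [hX]; simp)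
    simpa using this
  obtain ⟨hx1, hx2, hx3⟩ := digit_ne_special hx0d
  -- ===== A side reaches the body =====
  have hA1 : aScan cs (PySem.List.enumerate cs 0) 0 = aBody cs ((P.length : Int) + 1) := by
    rw [hcs, PySem.List.enumerate_append, aScan_skip _ _ htf, PySem.List.enumerate_cons,
      aScan_cons, if_pos rfl, hX, List.cons_append, PySem.List.enumerate_cons, aScan_cons]
    rw [if_neg hx1, if_neg hx2, if_neg (by push_neg; exact ⟨hx3, by omega⟩)]
    congr 1
    push_cast
    ring
  -- ===== body: end index =====
  have hX0d : X0.all PySem.Chars.isdigit = true := by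
    have h := hXd
    rw [hX, List.all_cons, Bool.and_eq_true] at h
    exact h.2
  have hfind : PySem.Chars.findFrom cs [']'] ((P.length : Int) + 1 + 1) =
      ((P.length + X.length + Y.length + 2 : Nat) : Int) := by
    rw [show ((P.length : Int) + 1 + 1) = ((P.length + 2 : Nat) : Int) by push_cast; ring]
    have hk : P.length + 2 ≤ cs.length := by rw [hcs, hX]; simp
    rw [PySem.Chars.findFrom_natCast cs [']'] (P.length + 2) hk]
    have hdrop : List.drop (P.length + 2) cs = (X0 ++ ',' :: Y) ++ ']' :: S := by
      rw [hcs, hX, show P ++ '[' :: (x0 :: X0 ++ ',' :: (Y ++ ']' :: S)) =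
        (P ++ ['[', x0]) ++ ((X0 ++ ',' :: Y) ++ ']' :: S) by simp]
      rw [show P.length + 2 = (P ++ ['[', x0]).length by simp]
      exact List.drop_left ..
    have hmem : ']' ∉ X0 ++ ',' :: Y := by
      intro hm
      rcases List.mem_append.1 hm with hm | hm
      · exact (no_special_of_digits hX0d).1 hm
      · rcases List.mem_cons.1 hm with hm | hm
        · exact absurd hm (by decide)
        · exact (no_special_of_digits hYd).1 hm
    rw [hdrop, find_append_singleton hmem S]
    rw [if_neg (by intro hh; omega)]
    rw [hX]
    simp only [List.length_append, List.length_cons]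
    push_cast
    ring
  -- ===== body: slice and split =====
  have hslice : PySem.List.slice cs (some ((P.length : Int) + 1))
      (some ((P.length + X.length + Y.length + 2 : Nat) : Int)) = X ++ ',' :: Y := by
    rw [show ((P.length : Int) + 1) = ((P.length + 1 : Nat) : Int) by push_cast; ring,
      PySem.List.slice_natCast]
    rw [hcs, show P ++ '[' :: (X ++ ',' :: (Y ++ ']' :: S)) =
      (P ++ ['[']) ++ ((X ++ ',' :: Y) ++ ']' :: S) by simp]
    rw [show P.length + 1 = (P ++ ['[']).length by simp]
    rw [List.drop_left]
    rw [show P.length + X.length + Y.length + 2 - (P ++ ['[']).length = (X ++ ',' :: Y).length by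
      simp; omega]
    exact List.take_left ..
  have hsplit : PySem.Chars.splitOn (X ++ ',' :: Y) [','] = [X, Y] :=
    splitOn_two (no_special_of_digits hXd).2 (no_special_of_digits hYd).2
  -- ===== left phase =====
  obtain ⟨PL, hal, hblj⟩ := left_phase P ((PySem.Int.ofChars? X).getD 0) ((P.length : Int) + 1)
    hEL (X ++ ',' :: (Y ++ ']' :: S))
  -- ===== right phase =====
  obtain ⟨SR, har, hbfj⟩ := right_phase S ((PySem.Int.ofChars? Y).getD 0) hER
    (PL ++ '[' :: (X ++ ',' :: Y))
  -- ===== compute A =====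
  have hn1 : PL ++ '[' :: (X ++ ',' :: (Y ++ ']' :: S)) =
      (PL ++ '[' :: (X ++ ',' :: Y)) ++ ']' :: S := by simp
  have hn2 : (PL ++ '[' :: (X ++ ',' :: Y)) ++ ']' :: SR =
      PL ++ '[' :: (X ++ ',' :: (Y ++ ']' :: SR)) := by simp
  have horigin : ('[' :: (PySem.Int.toChars ((PySem.Int.ofChars? X).getD 0) ++
      ',' :: (PySem.Int.toChars ((PySem.Int.ofChars? Y).getD 0) ++ [']']))) =
      '[' :: (X ++ ',' :: (Y ++ [']'])) := by rw [hcx, hcy]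
  have hlen2 : PL.length ≤ ((PL ++ '[' :: (X ++ ',' :: Y)) ++ ']' :: SR).length := by simp
  have hfindo : PySem.Chars.findFrom ((PL ++ '[' :: (X ++ ',' :: Y)) ++ ']' :: SR)
      ('[' :: (X ++ ',' :: (Y ++ [']']))) ((PL.length : Nat) : Int) = ((PL.length : Nat) : Int) := by
    rw [PySem.Chars.findFrom_natCast _ _ PL.length hlen2]
    have hdropo : List.drop PL.length ((PL ++ '[' :: (X ++ ',' :: Y)) ++ ']' :: SR) =
        '[' :: (X ++ ',' :: (Y ++ ']' :: SR)) := by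
      rw [show (PL ++ '[' :: (X ++ ',' :: Y)) ++ ']' :: SR =
        PL ++ ('[' :: (X ++ ',' :: (Y ++ ']' :: SR))) by simp]
      exact List.drop_left ..
    rw [hdropo, find_prefix_zero (by simp) ⟨SR, by simp⟩]
    simp
  have hs1 : PySem.List.slice ((PL ++ '[' :: (X ++ ',' :: Y)) ++ ']' :: SR) none
      (some ((PL.length : Nat) : Int)) = PL := by
    rw [PySem.List.slice_to_natCast]
    rw [show (PL ++ '[' :: (X ++ ',' :: Y)) ++ ']' :: SR =
      PL ++ ('[' :: (X ++ ',' :: Y) ++ ']' :: SR) by simp]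
    exact List.take_left ..
  have hs2 : PySem.List.slice ((PL ++ '[' :: (X ++ ',' :: Y)) ++ ']' :: SR)
      (some (((PL.length : Nat) : Int) +
        (('[' :: (X ++ ',' :: (Y ++ [']']))).length : Int))) none = SR := by
    rw [show (((PL.length : Nat) : Int) + (('[' :: (X ++ ',' :: (Y ++ [']']))).length : Int)) =
      (((PL ++ '[' :: (X ++ ',' :: (Y ++ [']']))).length : Nat) : Int) by simp]
    rw [PySem.List.slice_from_natCast]
    rw [show (PL ++ '[' :: (X ++ ',' :: Y)) ++ ']' :: SR =
      (PL ++ '[' :: (X ++ ',' :: (Y ++ [']']))) ++ SR by simp]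
    exact List.drop_left ..
  have hA2 : aBody cs ((P.length : Int) + 1) = PL ++ '0' :: SR := by
    rw [aBody]
    simp only [hfind, hslice, hsplit]
    rw [if_neg (by omega)]
    simp only [horigin]
    rw [hcs]
    rw [hal]
    simp only []
    rw [show ((P.length + X.length + Y.length + 2 : Nat) : Int) +
        ((PL.length : Int) - (P.length : Int)) =
      (((PL ++ '[' :: (X ++ ',' :: Y)).length : Nat) : Int) by simp; push_cast; ring]
    rw [show (((PL ++ '[' :: (X ++ ',' :: (Y ++ ']' :: S))).length : Nat) : Int) =
      ((((PL ++ '[' :: (X ++ ',' :: Y)) ++ ']' :: S).length : Nat) : Int) by rw [hn1]]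
    rw [hn1, har]
    rw [show ((P.length : Int) + 1 + ((PL.length : Int) - (P.length : Int)) - 1) =
      ((PL.length : Nat) : Int) by push_cast; ring]
    rw [hfindo]
    rw [if_neg (by omega)]
    rw [hs1, hs2]
  -- ===== B side =====
  have hbrL : PySem.Chars.isdigit '[' = false := by decide
  have hbrC : PySem.Chars.isdigit ',' = false := by decide
  have hbrR : PySem.Chars.isdigit ']' = false := by decide
  have htok : tokenizeB cs =
      tokenizeB P ++ (['['] :: X :: [','] :: Y :: [']'] :: tokenizeB S) := by
    rw [hcs]
    rw [show P ++ '[' :: (X ++ ',' :: (Y ++ ']' :: S)) =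
      P ++ ('[' :: (X ++ ',' :: (Y ++ ']' :: S))) by simp]
    rw [tok_append (by simp [List.takeWhile_cons, hbrL]) P.length P (le_refl _)]
    rw [tok_cons_nondigit _ hbrL]
    rw [tok_run_append hXne hXd (by simp [List.takeWhile_cons, hbrC])]
    rw [tok_cons_nondigit _ hbrC]
    rw [tok_run_append hYne hYd (by simp [List.takeWhile_cons, hbrR])]
    rw [tok_cons_nondigit _ hbrR]
  have hblj' : (bumpLastB (tokenizeB P) ((PySem.Int.ofChars? X).getD 0)).flatten = PL := by
    rw [← join_nil_flatten]; exact hblj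
  have hbfj' : (bumpFirstB (tokenizeB S) ((PySem.Int.ofChars? Y).getD 0)).flatten = SR := by
    rw [← join_nil_flatten]; exact hbfj
  have hB : bScan cs [] 0 (tokenizeB cs) = PL ++ '0' :: SR := by
    rw [htok]
    rw [bScan_skip P.length P (le_refl _) cs [] _ htf (Or.inr ⟨_, rfl⟩)]
    rw [bScan_fire _ _ X Y (tokenizeB S) (by omega) (strIsdigit_of_run hXne hXd)
      (strIsdigit_of_run hYne hYd)]
    rw [show ((tokenizeB P).reverse ++ ([] : List (List Char))).reverse = tokenizeB P by simp]
    rw [join_nil_flatten, List.flatten_append, List.flatten_cons]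
    rw [hblj', hbfj']
    simp
  rw [hA1, hA2, hB]

-- ===== VERDICT (by name: the statement is the Claim_ definition above) =====
theorem explode_pair_spec : Claim_equal_explode_pair := by
  intro number hdom hpre
  show explode_pair number = explode_pair_alt number
  rw [explode_pair, explode_pair_alt]
  congr 1
  cases hloc : locate 0 number.toList with
  | clean =>
    have htf := locate_clean_tf hloc
    have hA : aScan number.toList (PySem.List.enumerate number.toList 0) 0 = number.toList := by
      conv_lhs => rw [← List.append_nil (PySem.List.enumerate number.toList 0)]
      rw [aScan_skip _ _ htf]
      rfl
    have hB : bScan number.toList [] 0 (tokenizeB number.toList) = number.toList := by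
      conv_lhs => rw [← List.append_nil (tokenizeB number.toList)]
      rw [bScan_skip number.toList.length number.toList (le_refl _) _ [] _ htf (Or.inl rfl)]
      rfl
    rw [hA, hB]
  | bad =>
    exfalso
    unfold Pre_explode_pair at hpre
    rw [hloc] at hpre
    exact absurd hpre (by simp)
  | found P r =>
    have hpre' : patChk r = true ∧ (edgeLB P || edgeRB (sOf r)) = false := by
      unfold Pre_explode_pair at hpre
      rw [hloc] at hpre
      simpa using hpre
    obtain ⟨hcseq, htf, hd5, -⟩ := locate_found hloc
    obtain ⟨X, Y, S, hreq, hXne, hXd, hYne, hYd, hcx, hcy, hsof⟩ := patChk_inv hpre'.1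
    have hedge : edgeLB P = false ∧ edgeRB S = false := by
      have := hpre'.2
      rw [hsof] at this
      simpa using this
    rw [hcseq, hreq]
    exact main_found htf hd5 hXne hXd hYne hYd hcx hcy hedge.1 hedge.2
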